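-- pv_equiv track=rewrite | github.com/HI-JIN2/1day-1solved | code/나머지한점.py | solution
-- ===== SOURCE A (Python) =====
-- def solution(v):
--     x=[]
--     y=[]
--     answer =[]
--
--     for i in range(3):
--         if v[i][0] in x:
--             x.remove(v[i][0])
--         elif v[i][0] not in x:
--             x.append(v[i][0])
--         if v[i][1]  in y:
--             y.remove(v[i][1])
--         elif v[i][1] not in y:
--             y.append(v[i][1])
--
--     answer.append(x[0])
--     answer.append(y[0])
--
--     return answer
-- ===== SOURCE B (Python) =====
-- def solution(v):
--     xs = [p[0] for p in v[:3]]
--     ys = [p[1] for p in v[:3]]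
--     x = next(a for a in xs if xs.count(a) % 2 == 1)
--     y = next(b for b in ys if ys.count(b) % 2 == 1)
--     return [x, y]
-- ===== Notes on version B (the rewrite author's own statement) =====
-- stated objective: simpler
-- what changed: Replaces A's running parity-toggle lists (membership test + remove/append per point) with building the x/y coordinate lists once and selecting the first coordinate whose count is odd.
import Mathlib
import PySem

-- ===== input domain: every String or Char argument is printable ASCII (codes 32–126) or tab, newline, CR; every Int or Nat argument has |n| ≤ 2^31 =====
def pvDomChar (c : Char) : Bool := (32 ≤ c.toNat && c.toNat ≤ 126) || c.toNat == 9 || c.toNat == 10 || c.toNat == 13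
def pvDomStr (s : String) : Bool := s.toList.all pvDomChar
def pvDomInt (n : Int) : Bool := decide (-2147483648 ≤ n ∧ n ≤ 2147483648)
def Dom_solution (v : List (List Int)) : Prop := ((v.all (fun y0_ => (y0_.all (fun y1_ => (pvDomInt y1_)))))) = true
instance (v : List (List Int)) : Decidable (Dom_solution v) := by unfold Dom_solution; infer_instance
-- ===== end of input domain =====

-- B replaces A's running parity-toggle lists by building the coordinate lists once and selecting
-- the first value whose count is odd (objective: simpler).

-- ===== PORT A =====
-- parity-toggle loop over i in range(3), updating lists x and y
def solution (v : List (List Int)) : List Int :=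
  let st := (PySem.List.pyRange 0 3 1).foldl
    (fun (st : List Int × List Int) (i : Int) =>
      let row := (PySem.List.pyGet? v i).getD []
      let vi0 := (PySem.List.pyGet? row 0).getD 0
      let vi1 := (PySem.List.pyGet? row 1).getD 0
      let x := if st.1.contains vi0 then (PySem.List.remove? st.1 vi0).getD st.1
               else st.1 ++ [vi0]
      let y := if st.2.contains vi1 then (PySem.List.remove? st.2 vi1).getD st.2
               else st.2 ++ [vi1]
      (x, y))
    ([], [])
  [(PySem.List.pyGet? st.1 0).getD 0, (PySem.List.pyGet? st.2 0).getD 0]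

-- ===== PORT B =====
-- next(a for a in xs if xs.count(a) % 2 == 1)
def firstOddCount (xs : List Int) : Int :=
  (xs.find? (fun a => PySem.List.count xs a % 2 == 1)).getD 0

def solution_alt (v : List (List Int)) : List Int :=
  let v3 := PySem.List.slice v none (some 3)
  let xs := v3.map (fun p => (PySem.List.pyGet? p 0).getD 0)
  let ys := v3.map (fun p => (PySem.List.pyGet? p 1).getD 0)
  [firstOddCount xs, firstOddCount ys]

-- ===== PRECONDITION & SPEC =====
-- A indexes v[0..2] and each of those rows at positions 0 and 1: anything shorter raises IndexError.
def Pre_solution (v : List (List Int)) : Prop :=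
  3 ≤ v.length ∧ ∀ r ∈ v.take 3, 2 ≤ r.length
instance (v : List (List Int)) : Decidable (Pre_solution v) := by unfold Pre_solution; infer_instance
def pvWitness_solution : List (List Int) := [[1, 1], [1, 4], [5, 4]]

def Spec_solution (v : List (List Int)) (out : List Int) : Prop := out = solution_alt v
instance (v : List (List Int)) (out : List Int) : Decidable (Spec_solution v out) := by unfold Spec_solution; infer_instance

-- ===== CLAIM (what is proved, stated in full; the proofs are below) =====
def Claim_equal_solution : Prop := ∀ (v : List (List Int)), Dom_solution v → Pre_solution v → Spec_solution v (solution v)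

-- ===== LEMMAS AND PROOFS =====

-- one parity-toggle step of A's loop (proof-side abbreviation)
def tog (l : List Int) (x : Int) : List Int :=
  if l.contains x then (PySem.List.remove? l x).getD l else l ++ [x]

-- One axis: three parity toggles starting from [] leave, in position 0, exactly the first
-- element of [a,b,c] with odd multiplicity.
theorem toggle3_head (a b c : Int) :
    (PySem.List.pyGet? (tog (tog (tog [] a) b) c) 0).getD 0 = firstOddCount [a, b, c] := by
  by_cases hba : b = a <;> by_cases hca : c = a <;> by_cases hcb : c = b
  · subst hba; subst hca
    simp [tog, firstOddCount, PySem.List.count, PySem.List.remove?, PySem.List.pyGet?,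
      PySem.List.pyIdx?, List.find?]
  · exact absurd (hca.trans hba.symm) hcb
  · exact absurd (hcb.trans hba) hca
  · subst hba
    simp [tog, firstOddCount, PySem.List.count, PySem.List.remove?, PySem.List.pyGet?,
      PySem.List.pyIdx?, List.find?, hca, Ne.symm hca]
  · exact absurd ((hca.symm.trans hcb).symm) hba
  · subst hca
    simp [tog, firstOddCount, PySem.List.count, PySem.List.remove?, PySem.List.pyGet?,
      PySem.List.pyIdx?, List.find?, hba, Ne.symm hba, List.idxOf?, List.findIdx?, List.findIdx?.go]
  · subst hcb
    simp [tog, firstOddCount, PySem.List.count, PySem.List.remove?, PySem.List.pyGet?,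
      PySem.List.pyIdx?, List.find?, hba, Ne.symm hba, List.idxOf?, List.findIdx?, List.findIdx?.go]
  · simp [tog, firstOddCount, PySem.List.count, PySem.List.pyGet?,
      PySem.List.pyIdx?, List.find?, hba, hca, hcb, Ne.symm hba, Ne.symm hca, Ne.symm hcb]

theorem solution_spec_aux (r0 r1 r2 : List Int) (t : List (List Int))
    (h0 : 2 ≤ r0.length) (h1 : 2 ≤ r1.length) (h2 : 2 ≤ r2.length) :
    solution (r0 :: r1 :: r2 :: t) = solution_alt (r0 :: r1 :: r2 :: t) := by
  obtain ⟨a0, b0, t0, rfl⟩ : ∃ a b t', r0 = a :: b :: t' := by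
    match r0, h0 with | a :: b :: t', _ => exact ⟨a, b, t', rfl⟩
  obtain ⟨a1, b1, t1, rfl⟩ : ∃ a b t', r1 = a :: b :: t' := by
    match r1, h1 with | a :: b :: t', _ => exact ⟨a, b, t', rfl⟩
  obtain ⟨a2, b2, t2, rfl⟩ : ∃ a b t', r2 = a :: b :: t' := by
    match r2, h2 with | a :: b :: t', _ => exact ⟨a, b, t', rfl⟩
  have hx := toggle3_head a0 a1 a2
  have hy := toggle3_head b0 b1 b2
  simp only [tog] at hx hy
  have hr : PySem.List.pyRange 0 3 1 = [0, 1, 2] := by decide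
  have g1 : PySem.List.pyGet? ((a0 :: b0 :: t0) :: (a1 :: b1 :: t1) :: (a2 :: b2 :: t2) :: t) 1
      = some (a1 :: b1 :: t1) := by
    simp [PySem.List.pyGet?, PySem.List.pyIdx?,
      show (0:Int) ≤ (t.length:Int) + 1 from by omega]
  have g2 : PySem.List.pyGet? ((a0 :: b0 :: t0) :: (a1 :: b1 :: t1) :: (a2 :: b2 :: t2) :: t) 2
      = some (a2 :: b2 :: t2) := by
    simp [PySem.List.pyGet?, PySem.List.pyIdx?,
      show (2:Int) ≤ (t.length:Int) + 1 + 1 from by omega]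
  have r0 : ∀ (x y : Int) (t' : List Int), PySem.List.pyGet? (x :: y :: t') 0 = some x := by
    intro x y t'
    simp [PySem.List.pyGet?, PySem.List.pyIdx?,
      show (0:Int) ≤ (t'.length:Int) + 1 from by omega]
  have r1 : ∀ (x y : Int) (t' : List Int), PySem.List.pyGet? (x :: y :: t') 1 = some y := by
    intro x y t'
    simp [PySem.List.pyGet?, PySem.List.pyIdx?,
      show (0:Int) ≤ (t'.length:Int) + 1 from by omega]
  have hsl : PySem.List.slice ((a0 :: b0 :: t0) :: (a1 :: b1 :: t1) :: (a2 :: b2 :: t2) :: t) none (some 3)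
      = [a0 :: b0 :: t0, a1 :: b1 :: t1, a2 :: b2 :: t2] := by
    simp [PySem.List.slice, PySem.List.clampIdx]
  simp only [solution, solution_alt, hr, hsl, List.foldl, List.map,
    PySem.List.pyGet?_zero_cons, g1, g2, r0, r1, Option.getD_some]
  simpa using And.intro hx hy

-- ===== VERDICT (by name: the statement is the Claim_ definition above) =====
theorem solution_spec : Claim_equal_solution := by
  intro v _ hpre
  obtain ⟨hlen, hrows⟩ := hpre
  match v, hlen with
  | r0 :: r1 :: r2 :: t, _ =>
    have h0 := hrows r0 (by simp)
    have h1 := hrows r1 (by simp)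
    have h2 := hrows r2 (by simp)
    unfold Spec_solution
    exact solution_spec_aux r0 r1 r2 t h0 h1 h2
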